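-- pv_equiv track=rewrite | github.com/HOM-CISE/HOM-MBFL | _worst_higher_mutant_set_extend/util.py | replaceOnce
-- ===== SOURCE A (Python) =====
-- def _getnext(a,a_next):
--     al = len(a)
--     a_next[0] = -1
--     k = -1
--     j = 0
--     while j < al-1:
--         if k == -1 or a[j] == a[k]:
--             j += 1
--             k += 1
--             a_next[j] = k
--         else:
--             k = a_next[k]
--
-- def _kmpSearchList(a, b, a_next):
--     i = j = 0
--     al = len(a)
--     bl = len(b)
--     ans = []
--     num = 0
--     while i < al:
--         j = 0;
--         while i < al and j < bl:
--             if j == -1 or a[i] == b[j]: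
--                 i += 1
--                 j += 1
--             else:
--                 j = a_next[j]
--
--         if j == bl:
--             i = i - j
--             ans.append(i);
--             i = i + 1
--     return ans;
--
-- def findIndex(a, b):
--     '''
--
--     :param a:(type:str) a is a main string.
--     :param b:(type:str) b is a sub string.
--     :return:(type:list) return all matching indexes
--     '''
--     # a = 'ABABCABDABBGAFDSBVSABDABB'
--     # b = 'ABDABB'
--     a_next = [0] * len(b)
--     _getnext(b, a_next)
--     t = _kmpSearchList(a, b, a_next)
--
--     return t
--
-- def replaceOnce(mainstr, substr, replace_str):
--     '''
--
--     :param mainstr:(type:str) mainstr is a main string.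
--     :param substr:(type:str) substr is a sub string.
--     :param replace_str:(type:str) replace_str is a replace string.
--     :return:(type:list) return all strings that have been replaced only once.
--     '''
--     result_list = []
--
--     replace_index = findIndex(mainstr, substr)
--     for index in replace_index:
--         temp_list = [mainstr[:index], mainstr[index + len(substr):]]
--         result_str = replace_str.join(temp_list)
--         result_list.append(result_str)
--
--     return result_list
-- ===== SOURCE B (Python) =====
-- def replaceOnce(mainstr, substr, replace_str):
--     '''Return all strings obtained from mainstr by replacing exactly one
--     (possibly overlapping) occurrence of substr with replace_str.'''
--     n = len(mainstr)
--     m = len(substr)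
--     result_list = []
--     for i in range(n - m + 1):
--         if mainstr[i:i + m] == substr:
--             result_list.append(mainstr[:i] + replace_str + mainstr[i + m:])
--     return result_list
-- ===== Notes on version B (the rewrite author's own statement) =====
-- stated objective: simpler
-- what changed: Drops the three-function KMP machinery (failure table + restarting KMP scan) for a single direct loop that tests a slice comparison at every start position and builds each replaced string in place; the per-character interpreted KMP loops are replaced by CPython's C-level slice comparison, a constant-factor speedup.
import Mathlib
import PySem

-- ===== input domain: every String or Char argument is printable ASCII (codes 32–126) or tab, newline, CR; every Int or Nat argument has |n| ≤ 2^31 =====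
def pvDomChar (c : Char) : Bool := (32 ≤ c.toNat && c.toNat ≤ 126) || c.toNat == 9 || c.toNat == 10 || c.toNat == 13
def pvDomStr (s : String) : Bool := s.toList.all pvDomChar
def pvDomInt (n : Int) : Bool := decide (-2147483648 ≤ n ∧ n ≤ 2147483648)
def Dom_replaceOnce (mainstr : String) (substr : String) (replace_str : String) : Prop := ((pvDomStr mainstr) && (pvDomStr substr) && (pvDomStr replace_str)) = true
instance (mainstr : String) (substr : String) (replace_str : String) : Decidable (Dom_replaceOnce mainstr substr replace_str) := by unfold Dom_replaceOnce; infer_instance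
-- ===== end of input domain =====

-- B drops A's KMP machinery for one direct slice-comparison loop (same result; return-value equivalence, A mutates no argument).

-- ===== PORT A =====
-- _getnext's while loop, one iteration (state: (a_next, k, j)); the final 'else' branch is the loop test failing (stay).
def pvGetnextStep (a : List Char) (s : List Int × Int × Int) : List Int × Int × Int :=
  if s.2.2 < (a.length : Int) - 1 then
    if s.2.1 = -1 ∨ PySem.List.pyGetD a s.2.2 ' ' = PySem.List.pyGetD a s.2.1 ' ' then
      (PySem.List.pySetD s.1 (s.2.2 + 1) (s.2.1 + 1), s.2.1 + 1, s.2.2 + 1)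
    else (s.1, PySem.List.pyGetD s.1 s.2.1 0, s.2.2)
  else s

-- _getnext(a, a_next): 'a_next[0] = -1' (pySetD: on an empty a_next Python raises IndexError — excluded by Pre_),
-- then the while loop; fuel len(a)^2 bounds the loop's iteration count (proved below), extra steps stay put.
def pvGetnext (a : List Char) (anext : List Int) : List Int :=
  ((pvGetnextStep a)^[a.length * a.length] (PySem.List.pySetD anext 0 (-1), -1, 0)).1

-- _kmpSearchList's inner while loop, one iteration (state: (i, j)); list reads are in range whenever reached.
def pvKmpInnerStep (a b : List Char) (t : List Int) (s : Int × Int) : Int × Int :=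
  if s.1 < (a.length : Int) ∧ s.2 < (b.length : Int) then
    if s.2 = -1 ∨ PySem.List.pyGetD a s.1 ' ' = PySem.List.pyGetD b s.2 ' ' then (s.1 + 1, s.2 + 1)
    else (s.1, PySem.List.pyGetD t s.2 0)
  else s

-- _kmpSearchList's outer while loop, one iteration (state: (i, ans)); 'j = 0' then the inner loop
-- (fuel len(a)*(len(b)+2)+2 bounds its iterations, proved below), then the 'if j == bl' block.
def pvKmpOuterStep (a b : List Char) (t : List Int) (s : Int × List Int) : Int × List Int :=
  if s.1 < (a.length : Int) then
    let r := (pvKmpInnerStep a b t)^[a.length * (b.length + 2) + 2] (s.1, 0)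
    if r.2 = (b.length : Int) then (r.1 - r.2 + 1, s.2 ++ [r.1 - r.2]) else (r.1, s.2)
  else s

-- _kmpSearchList(a, b, a_next): outer loop from (i, ans) = (0, []); each outer iteration advances i, fuel len(a)+1.
def pvKmpSearchList (a b : List Char) (t : List Int) : List Int :=
  ((pvKmpOuterStep a b t)^[a.length + 1] (0, [])).2

-- findIndex(a, b)
def pvFindIndex (a b : List Char) : List Int :=
  pvKmpSearchList a b (pvGetnext b (List.replicate b.length 0))

-- replaceOnce: for each index, replace_str.join([mainstr[:index], mainstr[index+len(substr):]])
def replaceOnce (mainstr : String) (substr : String) (replace_str : String) : List String :=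
  (pvFindIndex mainstr.toList substr.toList).foldl
    (fun acc index =>
      acc ++ [PySem.Str.join replace_str
        [PySem.Str.slice mainstr none (some index),
         PySem.Str.slice mainstr (some (index + (substr.toList.length : Int))) none]]) []

-- ===== PORT B =====
-- one loop over range(n - m + 1); slice test, build the replaced string in place
def replaceOnce_alt (mainstr : String) (substr : String) (replace_str : String) : List String :=
  let n : Int := mainstr.toList.length
  let m : Int := substr.toList.length
  (PySem.List.pyRange 0 (n - m + 1) 1).foldl
    (fun acc i =>
      if PySem.Str.slice mainstr (some i) (some (i + m)) = substr then
        acc ++ [PySem.Str.slice mainstr none (some i) ++ replace_str ++ PySem.Str.slice mainstr (some (i + m)) none]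
      else acc) []

-- ===== PRECONDITION & SPEC =====
-- Pre_ excludes only substr = "", on which A raises IndexError (a_next[0] = -1 on the empty failure table).
def Pre_replaceOnce (mainstr : String) (substr : String) (replace_str : String) : Prop := substr ≠ ""
instance (mainstr : String) (substr : String) (replace_str : String) : Decidable (Pre_replaceOnce mainstr substr replace_str) := by unfold Pre_replaceOnce; infer_instance

def pvWitness_replaceOnce : String × String × String := ("abcabab", "ab", "X")

def Spec_replaceOnce (mainstr : String) (substr : String) (replace_str : String) (out : List String) : Prop := out = replaceOnce_alt mainstr substr replace_str
instance (mainstr : String) (substr : String) (replace_str : String) (out : List String) : Decidable (Spec_replaceOnce mainstr substr replace_str out) := by unfold Spec_replaceOnce; infer_instance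

-- ===== CLAIM (what is proved, stated in full; the proofs are below) =====
def Claim_equal_replaceOnce : Prop := ∀ (mainstr : String) (substr : String) (replace_str : String), Dom_replaceOnce mainstr substr replace_str → Pre_replaceOnce mainstr substr replace_str → Spec_replaceOnce mainstr substr replace_str (replaceOnce mainstr substr replace_str)

-- ===== LEMMAS AND PROOFS =====

-- ---- generic while-loop facts (fuel-encoded loops: extra steps stay put) ----

theorem pvIterStay {σ : Type} (step : σ → σ) (C : σ → Prop)
    (hstay : ∀ s, ¬ C s → step s = s) :
    ∀ (n : ℕ) (s : σ), ¬ C s → step^[n] s = s := by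
  intro n
  induction n with
  | zero => intro s _; rfl
  | succ n ih =>
    intro s hs
    rw [Function.iterate_succ_apply, hstay s hs]
    exact ih s hs

theorem pvIterFix {σ : Type} (step : σ → σ) (C : σ → Prop) (P : σ → Prop) (μ : σ → ℕ)
    (hstay : ∀ s, ¬ C s → step s = s)
    (hstep : ∀ s, P s → C s → P (step s) ∧ μ (step s) < μ s) :
    ∀ (fuel : ℕ) (s : σ), P s → μ s < fuel → P (step^[fuel] s) ∧ ¬ C (step^[fuel] s) := by
  intro fuel
  induction fuel with
  | zero => intro s _ h; omega
  | succ n ih =>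
    intro s hP hμ
    by_cases hC : C s
    · obtain ⟨hP', hμ'⟩ := hstep s hP hC
      rw [Function.iterate_succ_apply]
      exact ih (step s) hP' (by omega)
    · rw [pvIterStay step C hstay _ s hC]
      exact ⟨hP, hC⟩

-- ---- pointwise characterisations ----

-- b.take k is a (proper) border of b.take j
abbrev pvBord (b : List Char) (j k : ℕ) : Prop :=
  k < j ∧ ∀ d, d < k → b.getD d ' ' = b.getD (j - k + d) ' '

-- b occurs in a at position p
abbrev pvMatch (a b : List Char) (p : ℕ) : Prop :=
  p + b.length ≤ a.length ∧ ∀ d, d < b.length → b.getD d ' ' = a.getD (p + d) ' '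

-- t is the KMP failure table of b: t[0] = -1, t[j] = length of the longest proper border of b.take j
def pvGood (b : List Char) (t : List Int) : Prop :=
  t.length = b.length ∧ t.getD 0 0 = -1 ∧
    ∀ j, 1 ≤ j → j < b.length →
      ∃ k : ℕ, t.getD j 0 = (k : Int) ∧ pvBord b j k ∧ ∀ s, pvBord b j s → s ≤ k

-- all occurrence positions, ascending
def pvOccs (a b : List Char) : List ℕ :=
  (List.range a.length).filter (fun p => decide (pvMatch a b p))

-- ---- small bridges ----

theorem pvSetD (t : List Int) (x : ℕ) (v : Int) (h : x < t.length) :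
    PySem.List.pySetD t (x : Int) v = t.set x v := by
  simp [PySem.List.pySetD, PySem.List.pySet?, PySem.List.pyIdx?, h]

theorem pvRangeCast (k : Int) :
    PySem.List.pyRange 0 k 1 = (List.range k.toNat).map (fun (p : ℕ) => (p : Int)) := by
  rcases le_or_gt k 0 with h | h
  · have h0 : k.toNat = 0 := by omega
    rw [h0, PySem.List.pyRange_of_pos 0 k (by omega : (0:Int) < 1)]
    simp [show ¬ (0:Int) < k by omega]
  · have h0 : k = (k.toNat : Int) := by omega
    rw [h0, PySem.List.pyRange_zero_natCast]
    simp [List.map_eq_flatMap, max_eq_left h.le]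

theorem pvFilterExt (pred : ℕ → Bool) (c d : ℕ) (hcd : c ≤ d)
    (h : ∀ p, c ≤ p → p < d → pred p = false) :
    (List.range d).filter pred = (List.range c).filter pred := by
  have hd : d = c + (d - c) := by omega
  rw [hd, List.range_add, List.filter_append]
  have h2 : (List.filter pred (List.map (c + ·) (List.range (d - c)))) = [] := by
    rw [List.filter_eq_nil_iff]
    intro x hx
    simp only [List.mem_map, List.mem_range] at hx
    obtain ⟨q, hq, rfl⟩ := hx
    simp [h (c + q) (by omega) (by omega)]
  rw [h2, List.append_nil]

theorem pvJoinTwo (r x y : String) : PySem.Str.join r [x, y] = x ++ r ++ y := by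
  apply String.toList_inj.mp
  rw [PySem.Str.toList_join]
  simp [PySem.Chars.join_cons_cons, PySem.Chars.join_singleton, String.toList_append]

theorem pvMatch_take (a b : List Char) (p : ℕ) (hm : 1 ≤ b.length) :
    (a.drop p).take b.length = b ↔ pvMatch a b p := by
  constructor
  · intro h
    have hlen := congrArg List.length h
    simp only [List.length_take, List.length_drop] at hlen
    have hpn : p + b.length ≤ a.length := by omega
    refine ⟨hpn, fun d hd => ?_⟩
    have hx := congrArg (fun l => l.getD d ' ') h
    simp only [List.getD_eq_getElem?_getD, List.getElem?_take_of_lt hd, List.getElem?_drop] at hx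
    simpa [List.getD_eq_getElem?_getD] using hx.symm
  · rintro ⟨hlen, hchars⟩
    apply List.ext_getElem?
    intro i
    by_cases hi : i < b.length
    · rw [List.getElem?_take_of_lt hi, List.getElem?_drop]
      have hx := hchars i hi
      have hai : p + i < a.length := by omega
      rw [List.getElem?_eq_getElem hai, List.getElem?_eq_getElem hi]
      simp only [List.getD_eq_getElem?_getD, List.getElem?_eq_getElem hai,
        List.getElem?_eq_getElem hi, Option.getD_some] at hx
      simp [hx]
    · rw [List.getElem?_eq_none (by omega : b.length ≤ i), List.getElem?_eq_none]
      simp only [List.length_take, List.length_drop]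
      omega

-- ---- _getnext builds the failure table ----

def pvGNInv (b : List Char) (s : List Int × Int × Int) : Prop :=
  ∃ jN : ℕ, s.2.2 = (jN : Int) ∧ jN + 1 ≤ b.length ∧
    s.1.length = b.length ∧ s.1.getD 0 0 = -1 ∧
    (-1 ≤ s.2.1 ∧ s.2.1 < (jN : Int)) ∧
    (∀ x, 1 ≤ x → x ≤ jN →
      ∃ k : ℕ, s.1.getD x 0 = (k : Int) ∧ pvBord b x k ∧ ∀ t', pvBord b x t' → t' ≤ k) ∧
    (∀ kN : ℕ, s.2.1 = (kN : Int) → pvBord b jN kN) ∧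
    (∀ t', pvBord b jN t' → b.getD t' ' ' = b.getD jN ' ' → (t' : Int) ≤ s.2.1)

theorem pvGetnext_good (b : List Char) (hm : 1 ≤ b.length) :
    pvGood b (pvGetnext b (List.replicate b.length 0)) := by
  unfold pvGetnext
  have hset0 : PySem.List.pySetD (List.replicate b.length 0) 0 (-1 : Int) =
      (List.replicate b.length 0).set 0 (-1) := by
    have := pvSetD (List.replicate b.length 0) 0 (-1) (by simpa using hm)
    simpa using this
  have main := pvIterFix (pvGetnextStep b) (fun s => s.2.2 < (b.length : Int) - 1)
    (pvGNInv b)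
    (fun s => (b.length - 1 - s.2.2.toNat) * (b.length + 1) + (s.2.1 + 1).toNat)
    (fun s hs => by unfold pvGetnextStep; rw [if_neg hs])
    ?_ (b.length * b.length) (PySem.List.pySetD (List.replicate b.length 0) 0 (-1), -1, 0)
    ?_ ?_
  · obtain ⟨⟨jN, hj, hjm, htl, ht0, ⟨hklo, hkhi⟩, hents, hG2, hG3⟩, hnc⟩ := main
    have hjN : jN = b.length - 1 := by
      rw [hj] at hnc
      omega
    exact ⟨htl, ht0, fun j h1 h2 => hents j h1 (by omega)⟩
  · -- one loop iteration preserves the invariant and decreases the measure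
    rintro s ⟨jN, hj, hjm, htl, ht0, ⟨hklo, hkhi⟩, hents, hG2, hG3⟩ hC
    have hjlt : jN + 1 < b.length := by
      rw [hj] at hC
      omega
    unfold pvGetnextStep
    rw [if_pos hC]
    by_cases hbr : s.2.1 = -1 ∨ PySem.List.pyGetD b s.2.2 ' ' = PySem.List.pyGetD b s.2.1 ' '
    · rw [if_pos hbr]
      have hk' : s.2.1 + 1 = (((s.2.1 + 1).toNat : ℕ) : Int) := by omega
      set kN' := (s.2.1 + 1).toNat with hkN'
      have hsetd : PySem.List.pySetD s.1 (s.2.2 + 1) (s.2.1 + 1) = s.1.set (jN + 1) ((kN' : ℕ) : Int) := by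
        rw [hj, hk']
        have hc1 : ((jN : ℕ) : Int) + 1 = (((jN + 1 : ℕ)) : Int) := by push_cast; ring
        rw [hc1]
        exact pvSetD s.1 (jN + 1) _ (by rw [htl]; omega)
      -- the stored value kN' is the longest proper border of b.take (jN+1)
      have hbordnew : pvBord b (jN + 1) kN' := by
        rcases eq_or_lt_of_le hklo with hkm1 | hkpos
        · exact ⟨by omega, fun d hd => absurd hd (by omega)⟩
        · obtain ⟨kK, hkeq⟩ : ∃ kK : ℕ, s.2.1 = (kK : Int) := ⟨s.2.1.toNat, by omega⟩
          have hch : PySem.List.pyGetD b s.2.2 ' ' = PySem.List.pyGetD b s.2.1 ' ' := by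
            rcases hbr with h | h
            · exact absurd h (by omega)
            · exact h
          have hz : kN' = kK + 1 := by omega
          have hbk : pvBord b jN kK := hG2 kK hkeq
          have hch2 : b.getD jN ' ' = b.getD kK ' ' := by
            rw [hj, hkeq] at hch
            simpa using hch
          rw [hz]
          refine ⟨by have := hbk.1; omega, fun d hd => ?_⟩
          rcases Nat.lt_or_ge d kK with hdlt | hdge
          · have h1 := hbk.2 d hdlt
            have hidx : jN + 1 - (kK + 1) + d = jN - kK + d := by omega
            rw [hidx]
            exact h1
          · have hdk : d = kK := by omega
            have hidx : jN + 1 - (kK + 1) + d = jN := by have := hbk.1; omega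
            rw [hidx, hdk]
            exact hch2.symm
      have hmaxnew : ∀ t', pvBord b (jN + 1) t' → t' ≤ kN' := by
        intro t' hb
        rcases Nat.eq_zero_or_pos t' with h0 | hpos
        · omega
        · have hlt : t' < jN + 1 := hb.1
          have hbp : pvBord b jN (t' - 1) := by
            refine ⟨by omega, fun d hd => ?_⟩
            have hx := hb.2 d (by omega)
            have hidx : jN + 1 - t' + d = jN - (t' - 1) + d := by omega
            rw [← hidx]
            exact hx
          have hchp : b.getD (t' - 1) ' ' = b.getD jN ' ' := by
            have hx := hb.2 (t' - 1) (by omega)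
            have hidx : jN + 1 - t' + (t' - 1) = jN := by omega
            rwa [hidx] at hx
          have := hG3 (t' - 1) hbp hchp
          omega
      unfold pvGNInv
      dsimp only
      refine ⟨⟨jN + 1, by rw [hj]; push_cast; ring, by omega, by rw [hsetd]; simpa using htl, ?_,
        ⟨by omega, by omega⟩, ?_, ?_, ?_⟩, ?_⟩
      · -- entry 0 is untouched
        rw [hsetd, List.getD_eq_getElem?_getD, List.getElem?_set, if_neg (by omega)]
        simpa [List.getD_eq_getElem?_getD] using ht0
      · -- the table entries 1..jN+1 are now all correct
        intro x hx1 hx2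
        rcases Nat.lt_or_ge x (jN + 1) with hxlt | hxge
        · obtain ⟨k, hk, hkb, hkm⟩ := hents x hx1 (by omega)
          refine ⟨k, ?_, hkb, hkm⟩
          rw [hsetd, List.getD_eq_getElem?_getD, List.getElem?_set, if_neg (by omega)]
          simpa [List.getD_eq_getElem?_getD] using hk
        · have hxe : x = jN + 1 := by omega
          refine ⟨kN', ?_, hxe ▸ hbordnew, hxe ▸ hmaxnew⟩
          rw [hsetd, hxe, List.getD_eq_getElem?_getD, List.getElem?_set]
          rw [if_pos rfl, if_pos (by rw [htl]; omega)]
          simp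
      · intro kN2 hkN2
        have : kN2 = kN' := by omega
        exact this ▸ hbordnew
      · intro t' hb _
        have := hmaxnew t' hb
        omega
      · -- measure decreases
        dsimp only
        have h1 : s.2.2.toNat = jN := by omega
        have h2 : (s.2.2 + 1).toNat = jN + 1 := by omega
        have hmul : (b.length - 1 - jN) * (b.length + 1) =
            (b.length - 1 - (jN + 1)) * (b.length + 1) + (b.length + 1) := by
          have hA : b.length - 1 - jN = (b.length - 1 - (jN + 1)) + 1 := by omega
          rw [hA, Nat.succ_mul]
        rw [h1, h2, hmul]
        set P := (b.length - 1 - (jN + 1)) * (b.length + 1) with hP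
        omega
    · rw [if_neg hbr]
      have hne : s.2.1 ≠ -1 := fun h => hbr (Or.inl h)
      have hcne : PySem.List.pyGetD b s.2.2 ' ' ≠ PySem.List.pyGetD b s.2.1 ' ' :=
        fun h => hbr (Or.inr h)
      obtain ⟨kK, hkeq⟩ : ∃ kK : ℕ, s.2.1 = (kK : Int) := ⟨s.2.1.toNat, by omega⟩
      have hch' : b.getD jN ' ' ≠ b.getD kK ' ' := by
        rw [hj, hkeq] at hcne
        simpa using hcne
      by_cases hk0 : kK = 0
      · have hnewk : PySem.List.pyGetD s.1 s.2.1 0 = -1 := by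
          rw [hkeq, hk0]
          simpa [PySem.List.pyGetD_zero] using ht0
        rw [hnewk]
        unfold pvGNInv
        dsimp only
        refine ⟨⟨jN, hj, hjm, htl, ht0, ⟨by omega, by omega⟩, hents, ?_, ?_⟩, ?_⟩
        · intro kN2 hkN2
          exact absurd hkN2 (by omega)
        · intro t' hb hc
          have h1 := hG3 t' hb hc
          have ht'0 : t' = 0 := by omega
          exact absurd hc.symm (by rw [ht'0, ← hk0]; exact hch')
        · dsimp only
          have h1 : s.2.2.toNat = jN := by omega
          rw [h1]
          set P := (b.length - 1 - jN) * (b.length + 1) with hP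
          omega
      · obtain ⟨k₂, hk₂, ⟨hk₂lt, hk₂ch⟩, hk₂max⟩ := hents kK (by omega) (by omega)
        have hnewk : PySem.List.pyGetD s.1 s.2.1 0 = ((k₂ : ℕ) : Int) := by
          rw [hkeq]
          simpa using hk₂
        rw [hnewk]
        unfold pvGNInv
        dsimp only
        have hG2kK : pvBord b jN kK := hG2 kK hkeq
        refine ⟨⟨jN, hj, hjm, htl, ht0, ⟨by omega, by omega⟩, hents, ?_, ?_⟩, ?_⟩
        · intro kN2 hkN2
          have hkk : kN2 = k₂ := by omega
          subst hkk
          refine ⟨by omega, fun d hd => ?_⟩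
          have h1 : b.getD d ' ' = b.getD (kK - kN2 + d) ' ' := hk₂ch d hd
          have h2 : b.getD (kK - kN2 + d) ' ' = b.getD (jN - kK + (kK - kN2 + d)) ' ' :=
            hG2kK.2 (kK - kN2 + d) (by omega)
          have hidx : jN - kK + (kK - kN2 + d) = jN - kN2 + d := by omega
          rw [h1, h2, hidx]
        · intro t' hb hc
          have h1 := hG3 t' hb hc
          have ht'k : t' < kK := by
            rcases Nat.lt_or_ge t' kK with h | h
            · exact h
            · exact absurd hc.symm (by rw [show t' = kK by omega]; exact hch')
          have hbk : pvBord b kK t' := by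
            refine ⟨ht'k, fun d hd => ?_⟩
            have hx1 : b.getD d ' ' = b.getD (jN - t' + d) ' ' := hb.2 d hd
            have hx2 : b.getD (kK - t' + d) ' ' = b.getD (jN - kK + (kK - t' + d)) ' ' :=
              hG2kK.2 (kK - t' + d) (by omega)
            have hidx : jN - kK + (kK - t' + d) = jN - t' + d := by
              have := hb.1
              omega
            rw [hx1, hx2, hidx]
          have := hk₂max t' hbk
          omega
        · dsimp only
          have h1 : s.2.2.toNat = jN := by omega
          rw [h1]
          set P := (b.length - 1 - jN) * (b.length + 1) with hP
          omega
  · -- the invariant holds at the initial state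
    unfold pvGNInv
    dsimp only
    refine ⟨0, by norm_num, by omega, by rw [hset0]; simp, ?_, ⟨by omega, by omega⟩, ?_, ?_, ?_⟩
    · rw [hset0, List.getD_eq_getElem?_getD, List.getElem?_set, if_pos rfl,
        if_pos (by simpa using hm)]
      simp
    · intro x hx1 hx2
      omega
    · intro kN2 hkN2
      exact absurd hkN2 (by omega)
    · intro t' hb _
      exact absurd hb.1 (by omega)
  · -- the fuel bounds the measure
    dsimp only
    have h1 : (b.length - 1) * (b.length + 1) + 1 ≤ b.length * b.length := by
      obtain ⟨q, hq⟩ : ∃ q, b.length = q + 1 := ⟨b.length - 1, by omega⟩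
      rw [hq]
      have e1 : (q + 1 - 1) * (q + 1 + 1) = q * q + 2 * q := by
        simp
        ring
      have e2 : (q + 1) * (q + 1) = q * q + 2 * q + 1 := by ring
      omega
    have h2 : b.length - 1 - ((0 : Int)).toNat = b.length - 1 := by norm_num
    rw [h2]
    have h3 : ((-1 + 1 : Int)).toNat = 0 := by norm_num
    rw [h3]
    omega

-- ---- the inner while loop of _kmpSearchList scans for the first match ≥ i0 ----

def pvInF (a b : List Char) : ℕ := a.length * (b.length + 2) + 2

def pvInInv (a b : List Char) (i0 : ℕ) (s : Int × Int) : Prop :=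
  ∃ iN : ℕ, s.1 = (iN : Int) ∧ iN ≤ a.length ∧ -1 ≤ s.2 ∧ s.2 ≤ (b.length : Int) ∧
    i0 + s.2.toNat ≤ iN ∧
    (∀ d, d < s.2.toNat → b.getD d ' ' = a.getD (iN - s.2.toNat + d) ' ') ∧
    (∀ p, i0 ≤ p → p + s.2.toNat < iN → ¬ pvMatch a b p) ∧
    (s.2 = -1 → iN < a.length → a.getD iN ' ' ≠ b.getD 0 ' ')

theorem pvInner_exit (a b : List Char) (t : List Int) (hm : 1 ≤ b.length)
    (hg : pvGood b t) (i0 : ℕ) (h0 : i0 ≤ a.length) :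
    pvInInv a b i0 ((pvKmpInnerStep a b t)^[pvInF a b] ((i0 : Int), 0)) ∧
      ¬ (((pvKmpInnerStep a b t)^[pvInF a b] ((i0 : Int), 0)).1 < (a.length : Int) ∧
         ((pvKmpInnerStep a b t)^[pvInF a b] ((i0 : Int), 0)).2 < (b.length : Int)) := by
  obtain ⟨htl, ht0, hent⟩ := hg
  refine pvIterFix (pvKmpInnerStep a b t)
    (fun s => s.1 < (a.length : Int) ∧ s.2 < (b.length : Int))
    (pvInInv a b i0)
    (fun s => (a.length - s.1.toNat) * (b.length + 2) + (s.2 + 1).toNat)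
    (fun s hs => by unfold pvKmpInnerStep; rw [if_neg hs]) ?_ (pvInF a b) ((i0 : Int), 0) ?_ ?_
  · -- one loop iteration preserves the invariant and decreases the measure
    rintro s ⟨iN, hr1, hle, hjlo, hjhi, hq1, hq2, hq3, hq4⟩ hC
    have hiN : iN < a.length := by rw [hr1] at hC; exact_mod_cast hC.1
    have hjm : s.2 < (b.length : Int) := hC.2
    unfold pvKmpInnerStep
    rw [if_pos hC]
    by_cases hbr : s.2 = -1 ∨ PySem.List.pyGetD a s.1 ' ' = PySem.List.pyGetD b s.2 ' '
    · rw [if_pos hbr]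
      have hstate1 : s.1 + 1 = ((iN + 1 : ℕ) : Int) := by rw [hr1]; push_cast; ring
      have hfst : s.1.toNat = iN := by omega
      have hfst1 : (s.1 + 1).toNat = iN + 1 := by omega
      constructor
      · rcases eq_or_lt_of_le hjlo with hjm1 | hjpos
        · -- j = -1 : advance both, new j = 0
          have hj2 : s.2 = -1 := hjm1.symm
          have htn : s.2.toNat = 0 := by omega
          have htn' : (s.2 + 1).toNat = 0 := by omega
          refine ⟨iN + 1, hstate1, by omega, by omega, by omega, by omega, ?_, ?_,
            fun hh => absurd hh (by omega)⟩
          · intro d hd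
            exact absurd hd (by omega)
          · intro p hp1 hp2 hmatch
            rcases Nat.lt_or_ge p iN with hc | hc
            · exact hq3 p hp1 (by omega) hmatch
            · have hpn : p = iN := by omega
              have := hmatch.2 0 (by omega)
              rw [hpn] at this
              simp only [Nat.add_zero] at this
              exact hq4 hj2 hiN this.symm
        · -- 0 ≤ j : matched characters, advance both
          obtain ⟨jN, hj2⟩ : ∃ jN : ℕ, s.2 = (jN : Int) := ⟨s.2.toNat, by omega⟩
          have hchars : a.getD iN ' ' = b.getD jN ' ' := by
            rcases hbr with h | h
            · exact absurd h (by omega)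
            · rw [hr1, hj2] at h; simpa using h
          have hjNm : jN < b.length := by exact_mod_cast hj2 ▸ hjm
          have htn : s.2.toNat = jN := by omega
          have htn' : (s.2 + 1).toNat = jN + 1 := by omega
          rw [htn] at hq1 hq2 hq3
          refine ⟨iN + 1, hstate1, by omega, by omega, by omega, by omega, ?_, ?_,
            fun hh => absurd hh (by omega)⟩
          · intro d hd
            rw [htn'] at hd
            rcases Nat.lt_or_ge d jN with hdlt | hdge
            · have hidx : iN + 1 - (s.2 + 1).toNat + d = iN - jN + d := by omega
              rw [hidx]
              exact hq2 d hdlt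
            · have hdj : d = jN := by omega
              have hidx : iN + 1 - (s.2 + 1).toNat + d = iN := by omega
              rw [hidx, hdj]
              exact hchars.symm
          · intro p hp1 hp2 hmatch
            rw [htn'] at hp2
            exact hq3 p hp1 (by omega) hmatch
      · -- measure decreases
        have hmul : (a.length - iN) * (b.length + 2) =
            (a.length - (iN + 1)) * (b.length + 2) + (b.length + 2) := by
          have hA : a.length - iN = (a.length - (iN + 1)) + 1 := by omega
          rw [hA, Nat.succ_mul]
        dsimp only
        rw [hfst, hfst1, hmul]
        set P := (a.length - (iN + 1)) * (b.length + 2) with hP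
        omega
    · rw [if_neg hbr]
      have hne : s.2 ≠ -1 := fun h => hbr (Or.inl h)
      have hcne : PySem.List.pyGetD a s.1 ' ' ≠ PySem.List.pyGetD b s.2 ' ' :=
        fun h => hbr (Or.inr h)
      obtain ⟨jN, hj2⟩ : ∃ jN : ℕ, s.2 = (jN : Int) := ⟨s.2.toNat, by omega⟩
      have hjNm : jN < b.length := by exact_mod_cast hj2 ▸ hjm
      have hcne' : a.getD iN ' ' ≠ b.getD jN ' ' := by
        rw [hr1, hj2] at hcne
        simpa using hcne
      have htn : s.2.toNat = jN := by omega
      have hfst : s.1.toNat = iN := by omega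
      rw [htn] at hq1 hq2 hq3
      by_cases hj0 : jN = 0
      · -- failure entry t[0] = -1
        have hnewj : PySem.List.pyGetD t s.2 0 = -1 := by
          rw [hj2, hj0]
          simpa [PySem.List.pyGetD_zero] using ht0
        rw [hnewj]
        refine ⟨⟨iN, hr1, hle, by omega, by omega, by omega, ?_, ?_, ?_⟩, ?_⟩
        · intro d hd
          exact absurd hd (by omega)
        · intro p hp1 hp2 hmatch
          exact hq3 p hp1 (by omega) hmatch
        · intro _ _
          rw [← hj0]
          exact hcne'
        · dsimp only
          rw [hfst]
          set P := (a.length - iN) * (b.length + 2) with hP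
          omega
      · -- failure entry t[jN] = longest-proper-border length
        obtain ⟨k₂, hk2, hbord, hmax⟩ := hent jN (by omega) hjNm
        obtain ⟨hk2lt, hk2ch⟩ := hbord
        have hnewj : PySem.List.pyGetD t s.2 0 = (k₂ : Int) := by
          rw [hj2]
          simpa using hk2
        rw [hnewj]
        have hkt : ((k₂ : Int)).toNat = k₂ := by omega
        refine ⟨⟨iN, hr1, hle, by omega, by omega, by omega, ?_, ?_,
          fun hh => absurd hh (by omega)⟩, ?_⟩
        · intro d hd
          rw [hkt] at hd ⊢
          have h1 : b.getD d ' ' = b.getD (jN - k₂ + d) ' ' := hk2ch d hd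
          have h2 : b.getD (jN - k₂ + d) ' ' = a.getD (iN - jN + (jN - k₂ + d)) ' ' :=
            hq2 (jN - k₂ + d) (by omega)
          have hidx : iN - jN + (jN - k₂ + d) = iN - k₂ + d := by omega
          rw [h1, h2, hidx]
        · intro p hp1 hp2 hmatch
          rw [hkt] at hp2
          rcases Nat.lt_or_ge (p + jN) iN with hc | hc
          · exact hq3 p hp1 hc hmatch
          · -- p lies inside the matched window: a longer border than k₂ would exist
            have hpm := hmatch.2
            have hplen := hmatch.1
            rcases Nat.lt_or_ge (iN - p) jN with hl | hl
            · -- iN - p < jN : b.take (iN - p) would be a proper border of b.take jN longer than k₂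
              have hbord2 : pvBord b jN (iN - p) := by
                refine ⟨by omega, fun d hd => ?_⟩
                have hx1 : b.getD d ' ' = a.getD (p + d) ' ' := hpm d (by omega)
                have hx2 : b.getD (jN - (iN - p) + d) ' ' =
                    a.getD (iN - jN + (jN - (iN - p) + d)) ' ' := hq2 _ (by omega)
                have hidx : iN - jN + (jN - (iN - p) + d) = p + d := by omega
                rw [hx1, hx2, hidx]
              have := hmax (iN - p) hbord2
              omega
            · -- iN - p = jN, i.e. p + jN = iN : the mismatching character matches
              have hpj : p + jN = iN := by omega
              have := hpm jN hjNm
              rw [hpj] at this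
              exact hcne' this.symm
        · dsimp only
          rw [hfst]
          set P := (a.length - iN) * (b.length + 2) with hP
          omega
  · -- the invariant holds initially
    refine ⟨i0, rfl, h0, by omega, by omega, by omega, ?_, ?_, fun hh => absurd hh (by omega)⟩
    · intro d hd
      exact absurd hd (by omega)
    · intro p hp1 hp2 _
      omega
  · -- the fuel bounds the measure
    unfold pvInF
    dsimp only
    have hmul : (a.length - ((i0 : Int)).toNat) * (b.length + 2) ≤ a.length * (b.length + 2) :=
      Nat.mul_le_mul_right _ (by omega)
    set P1 := (a.length - ((i0 : Int)).toNat) * (b.length + 2) with hP1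
    set P2 := a.length * (b.length + 2) with hP2
    omega

theorem pvInner_found (a b : List Char) (t : List Int) (hm : 1 ≤ b.length)
    (hg : pvGood b t) (i0 : ℕ) (h0 : i0 ≤ a.length) (p : ℕ) (hge : i0 ≤ p)
    (hp : pvMatch a b p) (hmin : ∀ q, i0 ≤ q → q < p → ¬ pvMatch a b q) :
    (pvKmpInnerStep a b t)^[pvInF a b] ((i0 : Int), 0) = (((p + b.length : ℕ) : Int), (b.length : Int)) := by
  obtain ⟨⟨iN, hr1, hle, hjlo, hjhi, hq1, hq2, hq3, hq4⟩, hexit⟩ := pvInner_exit a b t hm hg i0 h0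
  set r := (pvKmpInnerStep a b t)^[pvInF a b] ((i0 : Int), 0) with hr
  by_cases hj : r.2 = (b.length : Int)
  · have hjt : r.2.toNat = b.length := by omega
    have him : b.length ≤ iN := by omega
    have hqm : pvMatch a b (iN - b.length) := by
      refine ⟨by omega, fun d hd => ?_⟩
      have := hq2 d (by omega)
      rwa [hjt] at this
    have hqge : i0 ≤ iN - b.length := by omega
    have hpq : p = iN - b.length := by
      rcases lt_trichotomy p (iN - b.length) with h | h | h
      · exact absurd hp (hq3 p hge (by omega))
      · exact h
      · exact absurd hqm (hmin (iN - b.length) hqge h)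
    have h1 : r.1 = ((p + b.length : ℕ) : Int) := by rw [hr1]; push_cast; omega
    exact Prod.ext h1 hj
  · exfalso
    have hjlt : r.2 < (b.length : Int) := lt_of_le_of_ne hjhi hj
    have hnlt : ¬ (r.1 < (a.length : Int)) := fun h => hexit ⟨h, hjlt⟩
    rw [hr1] at hnlt
    have hiN : iN = a.length := by
      have := not_lt.mp hnlt
      omega
    have hjnt : r.2.toNat < b.length := by omega
    exact absurd hp (hq3 p hge (by omega))

theorem pvInner_none (a b : List Char) (t : List Int) (hm : 1 ≤ b.length)
    (hg : pvGood b t) (i0 : ℕ) (h0 : i0 ≤ a.length)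
    (hno : ∀ p, i0 ≤ p → ¬ pvMatch a b p) :
    ((pvKmpInnerStep a b t)^[pvInF a b] ((i0 : Int), 0)).1 = (a.length : Int) ∧
      ((pvKmpInnerStep a b t)^[pvInF a b] ((i0 : Int), 0)).2 ≠ (b.length : Int) := by
  obtain ⟨⟨iN, hr1, hle, hjlo, hjhi, hq1, hq2, hq3, hq4⟩, hexit⟩ := pvInner_exit a b t hm hg i0 h0
  set r := (pvKmpInnerStep a b t)^[pvInF a b] ((i0 : Int), 0) with hr
  have hj : r.2 ≠ (b.length : Int) := by
    intro hj
    have hjt : r.2.toNat = b.length := by omega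
    have him : b.length ≤ iN := by omega
    refine hno (iN - b.length) (by omega) ⟨by omega, fun d hd => ?_⟩
    have := hq2 d (by omega)
    rwa [hjt] at this
  have hjlt : r.2 < (b.length : Int) := lt_of_le_of_ne hjhi hj
  have hnlt : ¬ (r.1 < (a.length : Int)) := fun h => hexit ⟨h, hjlt⟩
  rw [hr1] at hnlt ⊢
  have hiN : iN = a.length := by
    have := not_lt.mp hnlt
    omega
  exact ⟨by rw [hiN], hj⟩

-- ---- the outer loop collects all occurrences in order ----

theorem pvSearch_eq (a b : List Char) (t : List Int) (hm : 1 ≤ b.length) (hg : pvGood b t) :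
    pvKmpSearchList a b t = (pvOccs a b).map (fun (p : ℕ) => (p : Int)) := by
  have main := pvIterFix (pvKmpOuterStep a b t) (fun s => s.1 < (a.length : Int))
    (fun s => ∃ iN : ℕ, s.1 = (iN : Int) ∧ iN ≤ a.length ∧
      s.2 = ((List.range iN).filter (fun p => decide (pvMatch a b p))).map (fun (p : ℕ) => (p : Int)))
    (fun s => ((a.length : Int) - s.1).toNat)
    (fun s hs => by unfold pvKmpOuterStep; rw [if_neg hs])
    ?_ (a.length + 1) (0, []) ⟨0, by simp, by omega, by simp⟩ (by simp)
  · obtain ⟨⟨iN, h1, h2, h3⟩, hnc⟩ := main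
    have hiN : iN = a.length := by
      simp only [h1] at hnc
      omega
    unfold pvKmpSearchList pvOccs
    rw [h3, hiN]
  · rintro s ⟨iN, h1, h2, h3⟩ hC
    simp only [h1] at hC
    have hiN : iN < a.length := by exact_mod_cast hC
    have hstep : pvKmpOuterStep a b t s =
        (let r := (pvKmpInnerStep a b t)^[pvInF a b] (((iN : Int)), 0)
         if r.2 = (b.length : Int) then (r.1 - r.2 + 1, s.2 ++ [r.1 - r.2]) else (r.1, s.2)) := by
      unfold pvKmpOuterStep pvInF
      rw [if_pos (by rw [h1]; exact_mod_cast hC), h1]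
    by_cases hEx : ∃ p, iN ≤ p ∧ pvMatch a b p
    · have hp₀ := Nat.find_spec hEx
      set p₀ := Nat.find hEx with hp₀def
      have hmin : ∀ q, iN ≤ q → q < p₀ → ¬ pvMatch a b q := by
        intro q hq1 hq2 hq3
        exact Nat.find_min hEx hq2 ⟨hq1, hq3⟩
      have hfound := pvInner_found a b t hm hg iN (le_of_lt hiN) p₀ hp₀.1 hp₀.2 hmin
      rw [hstep]
      simp only [hfound, if_true]
      have hlen : p₀ + b.length ≤ a.length := hp₀.2.1
      rw [h1]
      constructor
      · refine ⟨p₀ + 1, by push_cast; ring, by omega, ?_⟩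
        have hi2 : ((p₀ + b.length : ℕ) : Int) - (b.length : Int) = ((p₀ : ℕ) : Int) := by push_cast; ring
        rw [h3, hi2]
        rw [List.range_succ, List.filter_append, List.map_append,
          pvFilterExt (fun p => decide (pvMatch a b p)) iN p₀ hp₀.1
            (by intro q hq1 hq2; simp only [decide_eq_false_iff_not]; exact hmin q hq1 hq2)]
        congr 1
        have h22 := hp₀.2.2
        simp only [List.getD_eq_getElem?_getD] at h22
        have hdec : decide (∀ d < b.length, b[d]?.getD ' ' = a[p₀ + d]?.getD ' ') = true := by
          simpa using h22
        simp [hp₀.2.1, hdec]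
      · have : ((p₀ + b.length : ℕ) : Int) - (b.length : Int) + 1 = ((p₀ : ℕ) : Int) + 1 := by push_cast; ring
        rw [this]
        omega
    · have hno : ∀ p, iN ≤ p → ¬ pvMatch a b p := fun p hp hpm => hEx ⟨p, hp, hpm⟩
      have hnone := pvInner_none a b t hm hg iN (le_of_lt hiN) hno
      rw [hstep]
      dsimp only
      rw [if_neg hnone.2, hnone.1, h1]
      dsimp only
      constructor
      · refine ⟨a.length, rfl, le_refl _, ?_⟩
        rw [h3]
        rw [pvFilterExt (fun p => decide (pvMatch a b p)) iN a.length h2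
            (by intro q hq1 hq2; simp only [decide_eq_false_iff_not]; exact hno q hq1)]
      · omega

-- ---- assembling both sides ----

theorem pvA_eq (mainstr substr replace_str : String) (hm : 1 ≤ substr.toList.length) :
    replaceOnce mainstr substr replace_str =
      (pvOccs mainstr.toList substr.toList).map (fun (p : ℕ) =>
        PySem.Str.join replace_str
          [PySem.Str.slice mainstr none (some (p : Int)),
           PySem.Str.slice mainstr (some ((p : Int) + (substr.toList.length : Int))) none]) := by
  unfold replaceOnce pvFindIndex
  rw [pvSearch_eq _ _ _ hm (pvGetnext_good _ hm)]
  rw [PySem.List.foldl_append_singleton_eq_map]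
  simp only [List.map_map, List.nil_append]
  rfl

theorem pvB_eq (mainstr substr replace_str : String) (hm : 1 ≤ substr.toList.length) :
    replaceOnce_alt mainstr substr replace_str =
      (pvOccs mainstr.toList substr.toList).map (fun (p : ℕ) =>
        PySem.Str.slice mainstr none (some (p : Int)) ++ replace_str ++
          PySem.Str.slice mainstr (some ((p : Int) + (substr.toList.length : Int))) none) := by
  show (PySem.List.pyRange 0 ((mainstr.toList.length : Int) - (substr.toList.length : Int) + 1) 1).foldl _ [] = _
  rw [pvRangeCast, List.foldl_map]
  have hcond : ∀ (p : ℕ),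
      (PySem.Str.slice mainstr (some ((p : Int))) (some ((p : Int) + (substr.toList.length : Int))) = substr)
        ↔ pvMatch mainstr.toList substr.toList p := by
    intro p
    rw [← pvMatch_take mainstr.toList substr.toList p hm, ← String.toList_inj]
    constructor
    · intro h
      rw [← h]
      simp [PySem.List.slice_natCast_add]
    · intro h
      simpa [PySem.List.slice_natCast_add] using h
  have hif : (fun (acc : List String) (p : ℕ) =>
      if PySem.Str.slice mainstr (some ((p:Int))) (some ((p:Int) + (substr.toList.length : Int))) = substr then
        acc ++ [PySem.Str.slice mainstr none (some ((p:Int))) ++ replace_str ++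
          PySem.Str.slice mainstr (some ((p:Int) + (substr.toList.length : Int))) none]
      else acc) =
      (fun acc p =>
        if (fun q => decide (pvMatch mainstr.toList substr.toList q)) p = true then
          acc ++ [(fun q : ℕ => PySem.Str.slice mainstr none (some ((q:Int))) ++ replace_str ++
            PySem.Str.slice mainstr (some ((q:Int) + (substr.toList.length : Int))) none) p]
        else acc) := by
    funext acc p
    simp only [decide_eq_true_eq]
    by_cases h : pvMatch mainstr.toList substr.toList p
    · rw [if_pos ((hcond p).mpr h), if_pos h]
    · rw [if_neg (fun hc => h ((hcond p).mp hc)), if_neg h]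
  rw [hif, PySem.List.foldl_append_if, List.nil_append]
  unfold pvOccs
  rw [pvFilterExt (fun q => decide (pvMatch mainstr.toList substr.toList q))
      (((mainstr.toList.length : Int) - (substr.toList.length : Int) + 1).toNat)
      mainstr.toList.length (by omega)
      (by intro p hp hpn
          simp only [decide_eq_false_iff_not]
          rintro ⟨hlen, -⟩
          omega)]


-- ===== VERDICT (by name: the statement is the Claim_ definition above) =====
theorem replaceOnce_spec : Claim_equal_replaceOnce := by
  intro mainstr substr replace_str _ hpre
  have hm : 1 ≤ substr.toList.length := by
    rcases Nat.pos_of_ne_zero (fun h => hpre (String.toList_eq_nil_iff.mp (List.eq_nil_of_length_eq_zero h))) with h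
    exact h
  unfold Spec_replaceOnce
  rw [pvA_eq mainstr substr replace_str hm, pvB_eq mainstr substr replace_str hm]
  refine List.map_congr_left (fun p _ => ?_)
  exact pvJoinTwo replace_str _ _
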